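-- pv_equiv track=rewrite | github.com/openai/parameter-golf | records/track_non_record_16mb/2026-03-30_OPC_CausalPackedMemory_NativeFullSpecClean/vendor/conker_ledger/ledger.py | render_survival_mermaid
-- ===== SOURCE A (Python) =====
-- from typing import Any
--
-- def render_survival_mermaid(rows: list[dict[str, Any]]) -> str:
--     if not rows:
--         return "graph LR\n    empty[No survival data]"
--     total = len(rows)
--     survived = sum(1 for r in rows if r.get("status") == "survived_full_eval")
--     failed = sum(1 for r in rows if r.get("status") == "full_eval_failed")
--     bridge_only = sum(1 for r in rows if r.get("status") == "bridge_only")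
--     attempted = survived + failed
--     lines = [
--         "graph LR",
--         f'    A["Bridge Runs<br/>{total}"]',
--         f'    B["Full Eval Attempted<br/>{attempted}"]',
--         f'    C["Survived<br/>{survived}"]',
--         f'    D["Failed<br/>{failed}"]',
--         f'    E["Bridge Only<br/>{bridge_only}"]',
--         "    A --> B",
--         "    A --> E",
--         "    B --> C",
--         "    B --> D",
--         "    style C fill:#2ca02c,color:#fff",
--         "    style D fill:#c23b22,color:#fff",
--         "    style E fill:#7f7f7f,color:#fff",
--     ]
--     return "\n".join(lines)
-- ===== SOURCE B (Python) =====
-- def render_survival_mermaid(rows):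
--     if not rows:
--         return "graph LR\n    empty[No survival data]"
--     # single pass: one loop carries a (survived, failed, bridge_only) accumulator,
--     # classifying each row once with an exclusive elif chain
--     survived = failed = bridge_only = 0
--     for r in rows:
--         s = r.get("status")
--         if s == "survived_full_eval":
--             survived += 1
--         elif s == "full_eval_failed":
--             failed += 1
--         elif s == "bridge_only":
--             bridge_only += 1
--     return (
--         "graph LR\n"
--         f'    A["Bridge Runs<br/>{len(rows)}"]\n'
--         f'    B["Full Eval Attempted<br/>{survived + failed}"]\n'
--         f'    C["Survived<br/>{survived}"]\n'
--         f'    D["Failed<br/>{failed}"]\n'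
--         f'    E["Bridge Only<br/>{bridge_only}"]\n'
--         "    A --> B\n"
--         "    A --> E\n"
--         "    B --> C\n"
--         "    B --> D\n"
--         "    style C fill:#2ca02c,color:#fff\n"
--         "    style D fill:#c23b22,color:#fff\n"
--         "    style E fill:#7f7f7f,color:#fff"
--     )
-- ===== Notes on version B (the rewrite author's own statement) =====
-- stated objective: alternative
-- what changed: Collapses A's three staged sum(...) scans into one loop carrying a (survived, failed, bridge_only) accumulator with an exclusive elif chain per row, and assembles the output as a single template string instead of joining a lines list.
import Mathlib
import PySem

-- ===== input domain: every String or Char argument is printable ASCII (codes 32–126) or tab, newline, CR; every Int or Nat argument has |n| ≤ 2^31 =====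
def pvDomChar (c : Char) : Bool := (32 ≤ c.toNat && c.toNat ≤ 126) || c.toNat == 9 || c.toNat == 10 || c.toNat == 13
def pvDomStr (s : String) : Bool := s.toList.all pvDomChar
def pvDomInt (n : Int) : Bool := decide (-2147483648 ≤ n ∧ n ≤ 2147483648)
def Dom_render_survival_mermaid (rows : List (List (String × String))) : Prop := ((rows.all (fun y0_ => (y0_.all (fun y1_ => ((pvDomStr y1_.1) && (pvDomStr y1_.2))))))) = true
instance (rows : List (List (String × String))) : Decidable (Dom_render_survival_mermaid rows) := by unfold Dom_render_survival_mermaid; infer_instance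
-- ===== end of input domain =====

-- B collapses A's three staged scans into one loop with a (survived, failed, bridge_only) accumulator and builds the output as one template string (alternative decomposition; same cost).


-- ===== PORT A =====
def render_survival_mermaid (rows : List (List (String × String))) : String :=
  if rows = [] then "graph LR\n    empty[No survival data]"
  else
    let total : Int := rows.length
    let survived : Int := rows.foldl (fun acc r => if (PySem.Dict.mk r).get? "status" == some "survived_full_eval" then acc + 1 else acc) 0
    let failed : Int := rows.foldl (fun acc r => if (PySem.Dict.mk r).get? "status" == some "full_eval_failed" then acc + 1 else acc) 0
    let bridge_only : Int := rows.foldl (fun acc r => if (PySem.Dict.mk r).get? "status" == some "bridge_only" then acc + 1 else acc) 0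
    let attempted : Int := survived + failed
    let lines : List String := [
      "graph LR",
      "    A[\"Bridge Runs<br/>" ++ PySem.Int.toStr total ++ "\"]",
      "    B[\"Full Eval Attempted<br/>" ++ PySem.Int.toStr attempted ++ "\"]",
      "    C[\"Survived<br/>" ++ PySem.Int.toStr survived ++ "\"]",
      "    D[\"Failed<br/>" ++ PySem.Int.toStr failed ++ "\"]",
      "    E[\"Bridge Only<br/>" ++ PySem.Int.toStr bridge_only ++ "\"]",
      "    A --> B",
      "    A --> E",
      "    B --> C",
      "    B --> D",
      "    style C fill:#2ca02c,color:#fff",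
      "    style D fill:#c23b22,color:#fff",
      "    style E fill:#7f7f7f,color:#fff"]
    PySem.Str.join "\n" lines

-- ===== PORT B =====
-- the single-pass loop of Source B: one accumulator triple, exclusive elif chain
def pvTallyStep (t : Int × Int × Int) (r : List (String × String)) : Int × Int × Int :=
  let s := (PySem.Dict.mk r).get? "status"
  if s == some "survived_full_eval" then (t.1 + 1, t.2.1, t.2.2)
  else if s == some "full_eval_failed" then (t.1, t.2.1 + 1, t.2.2)
  else if s == some "bridge_only" then (t.1, t.2.1, t.2.2 + 1)
  else t

def render_survival_mermaid_alt (rows : List (List (String × String))) : String :=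
  if rows = [] then "graph LR\n    empty[No survival data]"
  else
    let t := rows.foldl pvTallyStep ((0 : Int), (0 : Int), (0 : Int))
    "graph LR\n"
      ++ "    A[\"Bridge Runs<br/>" ++ PySem.Int.toStr (rows.length : Int) ++ "\"]\n"
      ++ "    B[\"Full Eval Attempted<br/>" ++ PySem.Int.toStr (t.1 + t.2.1) ++ "\"]\n"
      ++ "    C[\"Survived<br/>" ++ PySem.Int.toStr t.1 ++ "\"]\n"
      ++ "    D[\"Failed<br/>" ++ PySem.Int.toStr t.2.1 ++ "\"]\n"
      ++ "    E[\"Bridge Only<br/>" ++ PySem.Int.toStr t.2.2 ++ "\"]\n"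
      ++ "    A --> B\n"
      ++ "    A --> E\n"
      ++ "    B --> C\n"
      ++ "    B --> D\n"
      ++ "    style C fill:#2ca02c,color:#fff\n"
      ++ "    style D fill:#c23b22,color:#fff\n"
      ++ "    style E fill:#7f7f7f,color:#fff"

-- ===== PRECONDITION & SPEC =====
def Spec_render_survival_mermaid (rows : List (List (String × String))) (out : String) : Prop := out = render_survival_mermaid_alt rows
instance (rows : List (List (String × String))) (out : String) : Decidable (Spec_render_survival_mermaid rows out) := by unfold Spec_render_survival_mermaid; infer_instance

-- ===== CLAIM =====
def Claim_equal_render_survival_mermaid : Prop := ∀ (rows : List (List (String × String))), Dom_render_survival_mermaid rows → Spec_render_survival_mermaid rows (render_survival_mermaid rows)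

-- ===== LEMMAS AND PROOFS =====

-- the one-pass triple fold computes exactly A's three independent 0/1 folds
lemma pv_tally_eq (rows : List (List (String × String))) (a b c : Int) :
    rows.foldl pvTallyStep (a, b, c)
    = (rows.foldl (fun acc r => if (PySem.Dict.mk r).get? "status" == some "survived_full_eval" then acc + 1 else acc) a,
       rows.foldl (fun acc r => if (PySem.Dict.mk r).get? "status" == some "full_eval_failed" then acc + 1 else acc) b,
       rows.foldl (fun acc r => if (PySem.Dict.mk r).get? "status" == some "bridge_only" then acc + 1 else acc) c) := by
  induction rows generalizing a b c with
  | nil => rfl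
  | cons r rs ih =>
    simp only [List.foldl_cons, pvTallyStep]
    rcases h : (PySem.Dict.mk r).get? "status" with _ | s
    · simp [ih]
    · by_cases h1 : s = "survived_full_eval"
      · simp [h1, ih]
      · by_cases h2 : s = "full_eval_failed"
        · simp [h1, h2, ih]
        · by_cases h3 : s = "bridge_only"
          · simp [h1, h2, h3, ih]
          · simp [h1, h2, h3, ih]

-- ===== VERDICT =====
set_option maxRecDepth 4096 in
theorem render_survival_mermaid_spec : Claim_equal_render_survival_mermaid := by
  intro rows _
  unfold Spec_render_survival_mermaid render_survival_mermaid render_survival_mermaid_alt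
  by_cases h : rows = []
  · simp [h]
  · simp only [if_neg h, pv_tally_eq]
    apply String.toList_injective
    simp [PySem.Str.toList_join, PySem.Chars.join, List.intercalate]
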